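-- pv_equiv track=rewrite | github.com/HrishiShinde/catalyst-count | catalyst_count/upload/views.py | parse_locality
-- ===== SOURCE A (Python) =====
-- def parse_locality(locality):
--     parts = [part.strip() for part in locality.split(',')]
--
--     location_dict = {'city': None, 'state': None, 'country': None}
--
--     if len(parts) == 3:
--         location_dict['city'], location_dict['state'], location_dict['country'] = parts
--     elif len(parts) == 2:
--         location_dict['city'], location_dict['state'] = parts
--     elif len(parts) == 1:
--         location_dict['city'] = parts[0]
--
--     return location_dict
-- ===== SOURCE B (Python) =====
-- def parse_locality(locality):
--     result = {'city': None, 'state': None, 'country': None}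
--     if locality.count(',') > 2:
--         return result
--     rest = locality
--     for key in ('city', 'state'):
--         i = rest.find(',')
--         if i == -1:
--             result[key] = rest.strip()
--             return result
--         result[key] = rest[:i].strip()
--         rest = rest[i + 1:]
--     result['country'] = rest.strip()
--     return result
-- ===== Notes on version B (the rewrite author's own statement) =====
-- stated objective: alternative
-- what changed: Instead of splitting the whole string into a list and branching on its length, B counts commas once as a guard and then consumes the string in a single pass, peeling one field off the front with find/slice per key and returning early at the last field.
import Mathlib
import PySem

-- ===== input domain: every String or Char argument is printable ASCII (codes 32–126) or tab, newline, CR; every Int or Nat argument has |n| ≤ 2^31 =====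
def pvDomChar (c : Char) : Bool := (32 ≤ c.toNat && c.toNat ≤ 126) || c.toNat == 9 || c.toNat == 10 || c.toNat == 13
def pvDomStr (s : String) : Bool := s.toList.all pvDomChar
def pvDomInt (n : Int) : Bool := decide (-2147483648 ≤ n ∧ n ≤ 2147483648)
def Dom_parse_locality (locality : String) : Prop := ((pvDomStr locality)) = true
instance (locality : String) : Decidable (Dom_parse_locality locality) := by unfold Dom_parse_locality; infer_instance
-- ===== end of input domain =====

-- B replaces A's split-into-a-list-then-branch-on-its-length with a single-pass consumer: a comma-count
-- guard, then repeated find/slice that peels one field off the front of the string per key, returning early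
-- at the last field (alternative decomposition; same cost).

-- ===== PORT A =====
def parse_locality (locality : String) : List (String × Option String) :=
  let parts := ((PySem.Str.split? locality ",").getD []).map PySem.Str.strip
  let d : PySem.Dict String (Option String) :=
    PySem.Dict.ofList [("city", none), ("state", none), ("country", none)]
  let d :=
    if parts.length = 3 then
      match parts with
      | [a, b, c] => ((d.insert "city" (some a)).insert "state" (some b)).insert "country" (some c)
      | _ => d
    else if parts.length = 2 then
      match parts with
      | [a, b] => (d.insert "city" (some a)).insert "state" (some b)
      | _ => d
    else if parts.length = 1 then
      match parts with
      | [a] => d.insert "city" (some a)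
      | _ => d
    else d
  d.items

-- ===== PORT B =====
-- B-side helper: the 'for key in (city, state)' loop with its early returns; after the loop, 'country'.
def pvFillB (keys : List String) (rest : String) (d : PySem.Dict String (Option String)) :
    PySem.Dict String (Option String) :=
  match keys with
  | [] => d.insert "country" (some (PySem.Str.strip rest))
  | k :: ks =>
    let i := PySem.Str.find rest ","
    if i = -1 then d.insert k (some (PySem.Str.strip rest))
    else
      pvFillB ks (PySem.Str.slice rest (some (i + 1)) none)
        (d.insert k (some (PySem.Str.strip (PySem.Str.slice rest none (some i)))))

def parse_locality_alt (locality : String) : List (String × Option String) :=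
  let d : PySem.Dict String (Option String) :=
    PySem.Dict.ofList [("city", none), ("state", none), ("country", none)]
  if 2 < PySem.Str.count locality "," then d.items
  else (pvFillB ["city", "state"] locality d).items

-- ===== PRECONDITION & SPEC =====
def Spec_parse_locality (locality : String) (out : List (String × Option String)) : Prop := out = parse_locality_alt locality
instance (locality : String) (out : List (String × Option String)) : Decidable (Spec_parse_locality locality out) := by unfold Spec_parse_locality; infer_instance

-- ===== CLAIM (what is proved, stated in full; the proofs are below) =====
def Claim_equal_parse_locality : Prop := ∀ (locality : String), Dom_parse_locality locality → Spec_parse_locality locality (parse_locality locality)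

-- ===== LEMMAS AND PROOFS =====

-- Proof-side model of str.split(','): the list of comma-separated pieces of a char list.
def pvConsHead (cs : List Char) : List (List Char) → List (List Char)
  | [] => [cs]
  | h :: t => (cs ++ h) :: t

def pvPieces : List Char → List (List Char)
  | [] => [[]]
  | c :: t => if c = ',' then [] :: pvPieces t else pvConsHead [c] (pvPieces t)

theorem pvPieces_ne_nil (s : List Char) : pvPieces s ≠ [] := by
  cases s with
  | nil => simp [pvPieces]
  | cons c t =>
    simp only [pvPieces]
    split
    · simp
    · cases h : pvPieces t <;> simp [pvConsHead]

theorem pvConsHead_nil {p : List (List Char)} (hp : p ≠ []) : pvConsHead [] p = p := by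
  cases p with
  | nil => exact absurd rfl hp
  | cons h t => simp [pvConsHead]

theorem pvConsHead_consHead (a b : List Char) {p : List (List Char)} (hp : p ≠ []) :
    pvConsHead a (pvConsHead b p) = pvConsHead (a ++ b) p := by
  cases p with
  | nil => exact absurd rfl hp
  | cons h t => simp [pvConsHead]

theorem pvSplitOn_go (l : List Char) : ∀ (fuel : Nat), l.length ≤ fuel → ∀ (cur : List Char) (acc : List (List Char)),
    PySem.Chars.splitOn.go [','] fuel l cur acc = acc.reverse ++ pvConsHead cur.reverse (pvPieces l) := by
  induction l with
  | nil =>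
    intro fuel _ cur acc
    cases fuel <;> simp [PySem.Chars.splitOn.go, pvPieces, pvConsHead]
  | cons c t ih =>
    intro fuel hf cur acc
    cases fuel with
    | zero => simp at hf
    | succ fuel =>
      rw [PySem.Chars.splitOn.go]
      by_cases hc : c = ','
      · simp only [List.isPrefixOf, hc, beq_self_eq_true, Bool.true_and, if_pos, List.length_singleton,
          List.drop_succ_cons, List.drop_zero]
        rw [ih fuel (by simpa using hf) [] (cur.reverse :: acc)]
        rw [show ([] : List Char).reverse = [] from rfl, pvConsHead_nil (pvPieces_ne_nil t)]
        simp [pvPieces, pvConsHead]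
      · simp only [List.isPrefixOf]
        rw [if_neg (by simp [Ne.symm hc])]
        rw [ih fuel (by simpa using hf) (c::cur) acc]
        rw [show (c::cur).reverse = cur.reverse ++ [c] from by simp]
        rw [show pvPieces (c::t) = pvConsHead [c] (pvPieces t) from by simp [pvPieces, hc]]
        rw [pvConsHead_consHead _ _ (pvPieces_ne_nil t)]

theorem pvSplitOn_eq (s : List Char) : PySem.Chars.splitOn s [','] = pvPieces s := by
  unfold PySem.Chars.splitOn
  rw [pvSplitOn_go s (s.length + 1) (by omega) [] []]
  simp [pvConsHead_nil (pvPieces_ne_nil s)]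

theorem pvCount_go (l : List Char) : ∀ (fuel : Nat), l.length ≤ fuel → ∀ (acc : Nat),
    PySem.Chars.count.go [','] fuel l acc = acc + l.count ',' := by
  induction l with
  | nil => intro fuel _ acc; cases fuel <;> simp [PySem.Chars.count.go]
  | cons c t ih =>
    intro fuel hf acc
    cases fuel with
    | zero => simp at hf
    | succ fuel =>
      rw [PySem.Chars.count.go]
      by_cases hc : c = ','
      · rw [show (if ([','].isPrefixOf (c::t)) = true then PySem.Chars.count.go [','] fuel (List.drop [','].length (c::t)) (acc+1) else PySem.Chars.count.go [','] fuel t acc) = PySem.Chars.count.go [','] fuel t (acc+1) from by simp [List.isPrefixOf, hc]]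
        rw [ih fuel (by simpa using hf) (acc+1)]
        simp [hc]
        omega
      · rw [show (if ([','].isPrefixOf (c::t)) = true then PySem.Chars.count.go [','] fuel (List.drop [','].length (c::t)) (acc+1) else PySem.Chars.count.go [','] fuel t acc) = PySem.Chars.count.go [','] fuel t acc from by simp [List.isPrefixOf, Ne.symm hc]]
        rw [ih fuel (by simpa using hf) acc]
        simp [hc]

theorem pvCount_comma (s : List Char) : PySem.Chars.count s [','] = s.count ',' := by
  unfold PySem.Chars.count
  rw [if_neg (by simp)]
  rw [pvCount_go s s.length le_rfl 0]
  simp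

theorem pvPieces_no_comma {s : List Char} (h : ',' ∉ s) : pvPieces s = [s] := by
  induction s with
  | nil => rfl
  | cons c t ih =>
    simp only [List.mem_cons, not_or] at h
    simp [pvPieces, Ne.symm h.1, ih h.2, pvConsHead]

theorem pvPieces_decomp {s r : List Char} {i : Nat} (hd : s.drop i = ',' :: r)
    (hmin : ',' ∉ s.take i) : pvPieces s = s.take i :: pvPieces r := by
  induction s generalizing i r with
  | nil => simp at hd
  | cons c t ih =>
    cases i with
    | zero =>
      simp only [List.drop_zero] at hd
      obtain ⟨rfl, rfl⟩ : c = ',' ∧ t = r := by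
        constructor <;> [exact (List.cons.injEq .. ▸ hd).1; exact (List.cons.injEq .. ▸ hd).2]
      simp [pvPieces]
    | succ j =>
      simp only [List.drop_succ_cons] at hd
      simp only [List.take_succ_cons, List.mem_cons, not_or] at hmin
      rw [show ((c :: t).take (j+1)) = c :: t.take j from by simp]
      simp only [pvPieces, if_neg (Ne.symm hmin.1)]
      rw [ih hd hmin.2]
      simp [pvConsHead]

-- str.find(',') when ',' occurs: a Nat index whose piece decomposition facts we need.
theorem pvFind_comma_mem {s : List Char} (h : ',' ∈ s) :
    ∃ i : Nat, PySem.Chars.find s [','] = (i : Int) ∧ s.drop i = ',' :: s.drop (i + 1) ∧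
      ',' ∉ s.take i := by
  have hnn : 0 ≤ PySem.Chars.find s [','] :=
    (PySem.Chars.find_nonneg_iff s [',']).2 ((List.singleton_infix_iff ',' s).2 h)
  obtain ⟨hpre, hminp⟩ := PySem.Chars.find_spec hnn
  refine ⟨(PySem.Chars.find s [',']).toNat, (Int.toNat_of_nonneg hnn).symm, ?_, ?_⟩
  · obtain ⟨u, hu⟩ := hpre
    have hdd : s.drop ((PySem.Chars.find s [',']).toNat + 1)
        = (s.drop (PySem.Chars.find s [',']).toNat).drop 1 := by
      rw [List.drop_drop, Nat.add_comm]
    rw [hdd, ← hu]; simp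
  · intro hmem
    obtain ⟨j, hj, hjv⟩ := List.getElem_of_mem hmem
    have hjlt : j < (PySem.Chars.find s [',']).toNat := lt_of_lt_of_le hj (by simp [List.length_take])
    have hjs : j < s.length := by
      have := List.length_take_le (PySem.Chars.find s [',']).toNat s
      have := hj; simp [List.length_take] at this; omega
    refine hminp j hjlt ⟨s.drop (j+1), ?_⟩
    have hv : s[j] = ',' := by
      rw [← hjv]; simp [List.getElem_take]
    rw [show ([','] : List Char) ++ s.drop (j+1) = s[j] :: s.drop (j+1) from by simp [hv]]
    exact (List.drop_eq_getElem_cons hjs).symm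

theorem pvNotMem_of_count_zero {s : List Char} (h : s.count ',' = 0) : ',' ∉ s :=
  fun hm => by simp [List.count_eq_zero] at h; exact h hm

-- parts, as A computes them, are the stripped pieces.
theorem pvPartsA (locality : String) :
    ((PySem.Str.split? locality ",").getD []).map PySem.Str.strip
      = (pvPieces locality.toList).map (fun p => String.ofList (PySem.Chars.strip p)) := by
  have h : (",").toList = [','] := rfl
  simp only [PySem.Str.split?, PySem.Chars.split?, h]
  rw [if_neg (by simp)]
  rw [pvSplitOn_eq]
  simp [Function.comp, PySem.Str.strip, String.toList_ofList]


theorem pvConsHead_length (cs : List Char) {p : List (List Char)} (hp : p ≠ []) :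
    (pvConsHead cs p).length = p.length := by
  cases p with
  | nil => exact absurd rfl hp
  | cons h t => simp [pvConsHead]

theorem pvPieces_length (s : List Char) : (pvPieces s).length = s.count ',' + 1 := by
  induction s with
  | nil => simp [pvPieces]
  | cons c t ih =>
    by_cases hc : c = ','
    · simp [pvPieces, hc, ih]
    · simp [pvPieces, hc, pvConsHead_length _ (pvPieces_ne_nil t), ih]

theorem pvStripStr (s : String) : PySem.Str.strip s = String.ofList (PySem.Chars.strip s.toList) := rfl

theorem pvSliceTo (s : String) (i : Nat) :
    (PySem.Str.slice s none (some (i : Int))).toList = s.toList.take i := by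
  simp [PySem.Str.slice, String.toList_ofList, PySem.Chars.slice_eq_listSlice, PySem.List.slice_to_natCast]

theorem pvSliceFrom (s : String) (i : Nat) :
    (PySem.Str.slice s (some (i : Int)) none).toList = s.toList.drop i := by
  simp [PySem.Str.slice, String.toList_ofList, PySem.Chars.slice_eq_listSlice, PySem.List.slice_from_natCast]

theorem pvFillB_last {k : String} (ks : List String) (rest : String)
    (d : PySem.Dict String (Option String)) (h : PySem.Chars.find rest.toList [','] = -1) :
    pvFillB (k :: ks) rest d = d.insert k (some (PySem.Str.strip rest)) := by
  have h' : PySem.Str.find rest "," = -1 := by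
    rw [PySem.Str.find_eq]; exact h
  simp only [pvFillB, h', if_pos]

theorem pvFillB_step {k : String} (ks : List String) (rest : String)
    (d : PySem.Dict String (Option String)) {i : Nat} (h : PySem.Chars.find rest.toList [','] = (i : Int)) :
    pvFillB (k :: ks) rest d
      = pvFillB ks (PySem.Str.slice rest (some ((i : Int) + 1)) none)
          (d.insert k (some (PySem.Str.strip (PySem.Str.slice rest none (some (i : Int)))))) := by
  have h' : PySem.Str.find rest "," = (i : Int) := by
    rw [PySem.Str.find_eq]; exact h
  simp only [pvFillB, h']
  rw [if_neg (by omega)]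

-- ===== VERDICT (by name: the statement is the Claim_ definition above) =====
theorem parse_locality_spec : Claim_equal_parse_locality := by
  intro locality _
  show parse_locality locality = parse_locality_alt locality
  have hcount : PySem.Str.count locality "," = locality.toList.count ',' := by
    rw [PySem.Str.count_eq, show (",").toList = [','] from rfl, pvCount_comma]
  simp only [parse_locality, parse_locality_alt, pvPartsA, hcount]
  by_cases h3 : 2 < locality.toList.count ','
  · rw [if_pos h3, if_neg (by simp [pvPieces_length]; omega),
      if_neg (by simp [pvPieces_length]; omega), if_neg (by simp [pvPieces_length]; omega)]
  · rw [if_neg h3]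
    rcases show locality.toList.count ',' = 0 ∨ locality.toList.count ',' = 1 ∨
        locality.toList.count ',' = 2 from by omega with hn | hn | hn
    · -- no comma: one piece
      have hmem : ',' ∉ locality.toList := pvNotMem_of_count_zero hn
      have hp : pvPieces locality.toList = [locality.toList] := pvPieces_no_comma hmem
      have hfind : PySem.Chars.find locality.toList [','] = -1 :=
        (PySem.Chars.find_eq_neg_one_iff _ _).2 (by simpa [List.singleton_infix_iff] using hmem)
      rw [pvFillB_last _ _ _ hfind, hp]
      rw [if_neg (by simp), if_neg (by simp), if_pos (by simp)]
      rfl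
    · -- one comma: two pieces
      have hmem : ',' ∈ locality.toList := by
        rw [← List.count_pos_iff]; omega
      obtain ⟨i, hfi, hdi, hti⟩ := pvFind_comma_mem hmem
      have hsplit : locality.toList.count ','
          = (locality.toList.take i).count ',' + (',' :: locality.toList.drop (i+1)).count ',' := by
        conv_lhs => rw [← List.take_append_drop i locality.toList]
        rw [List.count_append, hdi]
      have hr0 : (locality.toList.drop (i+1)).count ',' = 0 := by
        rw [List.count_eq_zero.2 (hti), List.count_cons] at hsplit
        simp at hsplit; omega
      have hp : pvPieces locality.toList = [locality.toList.take i, locality.toList.drop (i+1)] := by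
        rw [pvPieces_decomp hdi hti, pvPieces_no_comma (pvNotMem_of_count_zero hr0)]
      rw [pvFillB_step _ _ _ hfi]
      have hr1 : (PySem.Str.slice locality (some ((i : Int)+1)) none).toList
          = locality.toList.drop (i+1) := by
        rw [show ((i : Int)+1) = (((i+1 : Nat)) : Int) from by push_cast; ring, pvSliceFrom]
      have hfind2 : PySem.Chars.find
          (PySem.Str.slice locality (some ((i : Int)+1)) none).toList [','] = -1 := by
        rw [hr1]
        exact (PySem.Chars.find_eq_neg_one_iff _ _).2
          (by simpa [List.singleton_infix_iff] using pvNotMem_of_count_zero hr0)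
      rw [pvFillB_last _ _ _ hfind2, hp]
      rw [if_neg (by simp), if_pos (by simp)]
      rw [show PySem.Str.strip (PySem.Str.slice locality none (some (i : Int)))
            = String.ofList (PySem.Chars.strip (locality.toList.take i)) from by
          rw [pvStripStr, pvSliceTo],
        show PySem.Str.strip (PySem.Str.slice locality (some ((i : Int)+1)) none)
            = String.ofList (PySem.Chars.strip (locality.toList.drop (i+1))) from by
          rw [pvStripStr, hr1]]
      rfl
    · -- two commas: three pieces
      have hmem : ',' ∈ locality.toList := by
        rw [← List.count_pos_iff]; omega
      obtain ⟨i, hfi, hdi, hti⟩ := pvFind_comma_mem hmem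
      have hsplit : locality.toList.count ','
          = (locality.toList.take i).count ',' + (',' :: locality.toList.drop (i+1)).count ',' := by
        conv_lhs => rw [← List.take_append_drop i locality.toList]
        rw [List.count_append, hdi]
      have hr1c : (locality.toList.drop (i+1)).count ',' = 1 := by
        rw [List.count_eq_zero.2 (hti), List.count_cons] at hsplit
        simp at hsplit; omega
      have hmem2 : ',' ∈ locality.toList.drop (i+1) := by
        rw [← List.count_pos_iff]; omega
      obtain ⟨j, hfj, hdj, htj⟩ := pvFind_comma_mem hmem2
      have hsplit2 : (locality.toList.drop (i+1)).count ','
          = ((locality.toList.drop (i+1)).take j).count ','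
            + (',' :: (locality.toList.drop (i+1)).drop (j+1)).count ',' := by
        conv_lhs => rw [← List.take_append_drop j (locality.toList.drop (i+1))]
        rw [List.count_append, hdj]
      have hr20 : ((locality.toList.drop (i+1)).drop (j+1)).count ',' = 0 := by
        rw [List.count_eq_zero.2 (htj), List.count_cons] at hsplit2
        simp at hsplit2 ⊢
        omega
      have hp : pvPieces locality.toList
          = [locality.toList.take i, (locality.toList.drop (i+1)).take j,
             (locality.toList.drop (i+1)).drop (j+1)] := by
        rw [pvPieces_decomp hdi hti, pvPieces_decomp hdj htj,
          pvPieces_no_comma (pvNotMem_of_count_zero hr20)]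
      have hr1 : (PySem.Str.slice locality (some ((i : Int)+1)) none).toList
          = locality.toList.drop (i+1) := by
        rw [show ((i : Int)+1) = (((i+1 : Nat)) : Int) from by push_cast; ring, pvSliceFrom]
      rw [pvFillB_step _ _ _ hfi, pvFillB_step _ _ _ (by rw [hr1]; exact hfj), hp]
      simp only [pvFillB]
      have hr2 : (PySem.Str.slice (PySem.Str.slice locality (some ((i : Int)+1)) none)
            (some ((j : Int)+1)) none).toList
          = (locality.toList.drop (i+1)).drop (j+1) := by
        rw [show ((j : Int)+1) = (((j+1 : Nat)) : Int) from by push_cast; ring, pvSliceFrom, hr1]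
      rw [if_pos (by simp)]
      rw [show PySem.Str.strip (PySem.Str.slice locality none (some (i : Int)))
            = String.ofList (PySem.Chars.strip (locality.toList.take i)) from by
          rw [pvStripStr, pvSliceTo],
        show PySem.Str.strip (PySem.Str.slice (PySem.Str.slice locality (some ((i : Int)+1)) none)
              none (some (j : Int)))
            = String.ofList (PySem.Chars.strip ((locality.toList.drop (i+1)).take j)) from by
          rw [pvStripStr, pvSliceTo, hr1],
        show PySem.Str.strip (PySem.Str.slice (PySem.Str.slice locality (some ((i : Int)+1)) none)
              (some ((j : Int)+1)) none)
            = String.ofList (PySem.Chars.strip ((locality.toList.drop (i+1)).drop (j+1))) from by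
          rw [pvStripStr, hr2]]
      rfl
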